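-- pv_equiv track=rewrite | github.com/Wenfei-Yuan/cs150_final_project | backend/app/utils/text_cleaner.py | remove_references_section
-- ===== SOURCE A (Python) =====
-- def remove_references_section(paragraphs: list[str]) -> list[str]:
--     """Drop all paragraphs that appear after a 'References' heading."""
--     ref_keywords = {"references", "bibliography", "works cited"}
--     out: list[str] = []
--     for para in paragraphs:
--         if para.strip().lower() in ref_keywords:
--             break
--         out.append(para)
--     return out
-- ===== SOURCE B (Python) =====
-- def remove_references_section(paragraphs: list[str]) -> list[str]:
--     """Drop all paragraphs that appear after a 'References' heading.
--
--     Backward pass with a reset: scan from the end; a sentinel paragraph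
--     discards everything collected so far (it and anything after it must go).
--     The last sentinel met while scanning backwards is the first one in
--     forward order, so what survives is exactly the prefix before it.
--     """
--     ref_keywords = {"references", "bibliography", "works cited"}
--     kept: list[str] = []
--     for para in reversed(paragraphs):
--         if para.strip().lower() in ref_keywords:
--             kept = []
--         else:
--             kept.append(para)
--     kept.reverse()
--     return kept
-- ===== Notes on version B (the rewrite author's own statement) =====
-- stated objective: alternative
-- what changed: B replaces A's forward loop with an early break by a single backward pass with a reset accumulator: scanning from the end, each sentinel discards everything collected so far, and the collection is reversed at the end; no break, slice or index is used.
import Mathlib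
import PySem

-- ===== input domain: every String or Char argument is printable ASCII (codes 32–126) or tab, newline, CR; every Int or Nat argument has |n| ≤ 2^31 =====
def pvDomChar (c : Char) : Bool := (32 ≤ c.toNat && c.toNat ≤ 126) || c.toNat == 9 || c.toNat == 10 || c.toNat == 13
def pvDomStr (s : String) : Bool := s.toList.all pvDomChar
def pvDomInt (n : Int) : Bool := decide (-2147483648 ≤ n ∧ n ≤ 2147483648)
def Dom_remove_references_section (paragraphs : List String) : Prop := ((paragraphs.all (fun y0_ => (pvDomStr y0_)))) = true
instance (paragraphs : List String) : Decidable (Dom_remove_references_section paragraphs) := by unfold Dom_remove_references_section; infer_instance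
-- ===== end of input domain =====

-- B replaces A's forward loop-with-break by one backward pass with a reset accumulator (a sentinel discards everything collected so far), reversed at the end; same result.


-- ===== PORT A =====
-- 'para.strip().lower() in ref_keywords' (identical expression in A and B)
def pvIsRef (para : String) : Bool :=
  ["references", "bibliography", "works cited"].contains (PySem.Str.lower (PySem.Str.strip para))

-- A's for-loop with break, as structural recursion accumulating 'out'
def remove_references_section (paragraphs : List String) : List String :=
  match paragraphs with
  | [] => []
  | para :: rest => if pvIsRef para then [] else para :: remove_references_section rest

-- ===== PORT B =====
-- backward pass: fold over reversed(paragraphs); a sentinel resets 'kept' to [],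
-- otherwise kept.append(para); finally kept.reverse()
def remove_references_section_alt (paragraphs : List String) : List String :=
  (paragraphs.reverse.foldl
    (fun kept para => if pvIsRef para then [] else kept ++ [para]) []).reverse

-- ===== PRECONDITION & SPEC =====
def Spec_remove_references_section (paragraphs : List String) (out : List String) : Prop := out = remove_references_section_alt paragraphs
instance (paragraphs : List String) (out : List String) : Decidable (Spec_remove_references_section paragraphs out) := by unfold Spec_remove_references_section; infer_instance

-- ===== CLAIM (what is proved, stated in full; the proofs are below) =====
def Claim_equal_remove_references_section : Prop := ∀ (paragraphs : List String), Dom_remove_references_section paragraphs → Spec_remove_references_section paragraphs (remove_references_section paragraphs)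

-- ===== LEMMAS AND PROOFS =====
theorem pv_ab_eq (paragraphs : List String) :
    remove_references_section paragraphs = remove_references_section_alt paragraphs := by
  unfold remove_references_section_alt
  rw [List.foldl_reverse]
  induction paragraphs with
  | nil => rfl
  | cons p t ih =>
    simp only [remove_references_section, List.foldr_cons]
    by_cases h : pvIsRef p = true
    · simp [h]
    · have h' : pvIsRef p = false := by simpa using h
      simp [h', ih]

-- ===== VERDICT (by name: the statement is the Claim_ definition above) =====
theorem remove_references_section_spec : Claim_equal_remove_references_section := by
  intro paragraphs _
  unfold Spec_remove_references_section
  exact pv_ab_eq paragraphs
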